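-- pv_equiv track=rewrite | github.com/JerMa88/mood-recognition-yolo | landmark_embedding/scripts/prepare_gldv2_small.py | select_small
-- ===== SOURCE A (Python) =====
-- from typing import Dict, List, Tuple
--
-- def select_small(rows: List[Tuple[str, str, str]], max_classes: int, max_per_class: int) -> Dict[str, List[Tuple[str, str]]]:
--     by_class: Dict[str, List[Tuple[str, str]]] = {}
--     for img_id, landmark_id, url in rows:
--         if landmark_id not in by_class:
--             if len(by_class) >= max_classes:
--                 continue
--             by_class[landmark_id] = []
--         if len(by_class[landmark_id]) < max_per_class:
--             by_class[landmark_id].append((img_id, url))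
--     return by_class
-- ===== SOURCE B (Python) =====
-- from typing import Dict, List, Tuple
--
-- def select_small(rows: List[Tuple[str, str, str]], max_classes: int, max_per_class: int) -> Dict[str, List[Tuple[str, str]]]:
--     # Pass 1: the admitted classes are the first max_classes distinct landmark_ids.
--     allowed: List[str] = []
--     for _, landmark_id, _ in rows:
--         if len(allowed) >= max_classes:
--             break
--         if landmark_id not in allowed:
--             allowed.append(landmark_id)
--     # Pass 2: fill each admitted class with its first max_per_class rows.
--     by_class: Dict[str, List[Tuple[str, str]]] = {c: [] for c in allowed}
--     for img_id, landmark_id, url in rows: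
--         bucket = by_class.get(landmark_id)
--         if bucket is not None and len(bucket) < max_per_class:
--             by_class[landmark_id] = bucket + [(img_id, url)]
--     return by_class
-- ===== Notes on version B (the rewrite author's own statement) =====
-- stated objective: alternative
-- what changed: Replaces A's single pass with lazily created dict entries and an interleaved class-cap check by two passes: pass one computes the ordered list of admitted classes (first max_classes distinct landmark_ids), the dict is then pre-built with all keys and empty buckets, and pass two only appends rows of admitted classes under the per-class cap.
import Mathlib
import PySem

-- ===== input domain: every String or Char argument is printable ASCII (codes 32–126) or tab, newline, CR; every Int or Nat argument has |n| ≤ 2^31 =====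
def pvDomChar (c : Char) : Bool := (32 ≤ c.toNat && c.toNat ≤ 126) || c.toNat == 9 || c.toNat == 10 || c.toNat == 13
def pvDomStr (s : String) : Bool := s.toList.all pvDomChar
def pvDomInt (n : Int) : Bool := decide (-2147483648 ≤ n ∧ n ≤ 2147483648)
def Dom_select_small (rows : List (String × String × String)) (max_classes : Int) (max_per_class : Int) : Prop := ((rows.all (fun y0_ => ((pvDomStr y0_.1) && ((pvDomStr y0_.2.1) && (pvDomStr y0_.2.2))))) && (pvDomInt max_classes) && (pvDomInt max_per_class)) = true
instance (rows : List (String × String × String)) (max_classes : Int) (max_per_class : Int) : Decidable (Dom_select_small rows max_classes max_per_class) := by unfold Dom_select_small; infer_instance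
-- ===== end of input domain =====

-- B replaces A's single lazy-insertion pass by two passes (admitted classes first, then filling); alternative decomposition, same return value.


-- ===== PORT A =====
-- one loop step of A: lazily create the key (under the class cap, 'continue' when full), then append under the per-class cap
def selA (max_classes max_per_class : Int)
    (by_class : PySem.Dict String (List (String × String)))
    (row : String × String × String) : PySem.Dict String (List (String × String)) :=
  match row with
  | (img_id, landmark_id, url) =>
    if by_class.contains landmark_id = false ∧ max_classes ≤ (by_class.size : Int) then
      by_class  -- 'continue'
    else
      let d := if by_class.contains landmark_id then by_class else by_class.insert landmark_id []
      if ((d.getD landmark_id []).length : Int) < max_per_class then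
        d.insert landmark_id (d.getD landmark_id [] ++ [(img_id, url)])
      else d

def select_small (rows : List (String × String × String)) (max_classes : Int) (max_per_class : Int) : List (String × List (String × String)) :=
  (rows.foldl (selA max_classes max_per_class) PySem.Dict.empty).items

-- ===== PORT B =====
-- pass 1 of B: the admitted classes, i.e. the first max_classes distinct landmark_ids (loop with break)
def allowedB (max_classes : Int) : List (String × String × String) → List String → List String
  | [], allowed => allowed
  | (_, landmark_id, _) :: rest, allowed =>
    if max_classes ≤ (allowed.length : Int) then allowed  -- 'break'
    else if allowed.contains landmark_id then allowedB max_classes rest allowed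
    else allowedB max_classes rest (allowed ++ [landmark_id])

-- pass 2 of B: one fill step — append the row to its bucket if the class is admitted and below the per-class cap
def fillB (max_per_class : Int)
    (by_class : PySem.Dict String (List (String × String)))
    (row : String × String × String) : PySem.Dict String (List (String × String)) :=
  match row with
  | (img_id, landmark_id, url) =>
    match by_class.get? landmark_id with
    | none => by_class
    | some bucket =>
      if (bucket.length : Int) < max_per_class then
        by_class.insert landmark_id (bucket ++ [(img_id, url)])
      else by_class

def select_small_alt (rows : List (String × String × String)) (max_classes : Int) (max_per_class : Int) : List (String × List (String × String)) :=
  ((rows.foldl (fillB max_per_class)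
      ((allowedB max_classes rows []).foldl
        (fun d c => d.insert c ([] : List (String × String))) PySem.Dict.empty))).items

-- ===== PRECONDITION & SPEC =====
def Spec_select_small (rows : List (String × String × String)) (max_classes : Int) (max_per_class : Int) (out : List (String × List (String × String))) : Prop := out = select_small_alt rows max_classes max_per_class
instance (rows : List (String × String × String)) (max_classes : Int) (max_per_class : Int) (out : List (String × List (String × String))) : Decidable (Spec_select_small rows max_classes max_per_class out) := by unfold Spec_select_small; infer_instance

-- ===== CLAIM (what is proved, stated in full; the proofs are below) =====
def Claim_equal_select_small : Prop := ∀ (rows : List (String × String × String)) (max_classes : Int) (max_per_class : Int), Dom_select_small rows max_classes max_per_class → Spec_select_small rows max_classes max_per_class (select_small rows max_classes max_per_class)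

-- ===== LEMMAS AND PROOFS =====

-- the NEW keys A/B admit, given the keys `seen` already present (proof-side normal form of allowedB)
def newKeys (max_classes : Int) : List (String × String × String) → List String → List String
  | [], _ => []
  | (_, landmark_id, _) :: rest, seen =>
    if max_classes ≤ (seen.length : Int) then []
    else if seen.contains landmark_id then newKeys max_classes rest seen
    else landmark_id :: newKeys max_classes rest (seen ++ [landmark_id])

lemma allowedB_eq (mc : Int) (rows : List (String × String × String)) :
    ∀ acc, allowedB mc rows acc = acc ++ newKeys mc rows acc := by
  induction rows with
  | nil => intro acc; simp [allowedB, newKeys]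
  | cons r rest ih =>
    intro acc
    obtain ⟨i, lid, u⟩ := r
    simp only [allowedB, newKeys]
    split
    · simp
    · split
      · exact ih acc
      · rw [ih (acc ++ [lid])]; simp

lemma newKeys_break (mc : Int) (rows : List (String × String × String)) (seen : List String)
    (h : mc ≤ (seen.length : Int)) : newKeys mc rows seen = [] := by
  cases rows with
  | nil => simp [newKeys]
  | cons r rest => obtain ⟨i, lid, u⟩ := r; simp [newKeys, h]

lemma newKeys_not_mem (mc : Int) (rows : List (String × String × String)) :
    ∀ seen c, c ∈ seen → c ∉ newKeys mc rows seen := by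
  induction rows with
  | nil => intro seen c _ ; simp [newKeys]
  | cons r rest ih =>
    intro seen c hc
    obtain ⟨i, lid, u⟩ := r
    simp only [newKeys]
    split
    · simp
    · split
      · exact ih seen c hc
      · next hlid =>
        intro hmem
        rcases List.mem_cons.mp hmem with h1 | h2
        · subst h1
          exact absurd ((List.contains_iff_mem).mpr hc) (by simpa using hlid)
        · exact ih (seen ++ [lid]) c (by simp [hc]) h2

lemma newKeys_nodup (mc : Int) (rows : List (String × String × String)) :
    ∀ seen, (newKeys mc rows seen).Nodup := by
  induction rows with
  | nil => intro seen; simp [newKeys]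
  | cons r rest ih =>
    intro seen
    obtain ⟨i, lid, u⟩ := r
    simp only [newKeys]
    split
    · simp
    · split
      · exact ih seen
      · exact List.nodup_cons.mpr ⟨newKeys_not_mem mc rest (seen ++ [lid]) lid (by simp), ih (seen ++ [lid])⟩

lemma newKeys_cons_mem (mc : Int) (i lid u : String) (rest : List (String × String × String))
    (seen : List String) (h : seen.contains lid = true) :
    newKeys mc ((i, lid, u) :: rest) seen = newKeys mc rest seen := by
  simp only [newKeys, h]
  split
  · next hbr => rw [newKeys_break mc rest seen hbr]
  · simp

lemma get?_mk_append (l1 l2 : List (String × List (String × String))) (k : String) :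
    (PySem.Dict.mk (l1 ++ l2)).get? k = ((PySem.Dict.mk l1).get? k).or ((PySem.Dict.mk l2).get? k) := by
  simp [PySem.Dict.get?, List.find?_append, Option.map_or]

-- relate List.contains on the key list with Dict.contains
lemma keys_contains_eq (d : PySem.Dict String (List (String × String))) (k : String) :
    d.keys.contains k = d.contains k := by
  rw [PySem.Dict.contains_eq_decide_mem_keys]
  by_cases h : k ∈ d.keys
  · simp [h]
  · simp [h]

-- a map that rewrites the bucket at key lid leaves pairs with other keys unchanged
lemma map_keep (lid : String) (v : List (String × String)) (E : List (String × List (String × String)))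
    (hE : ∀ p ∈ E, p.1 ≠ lid) :
    E.map (fun p => if (p.1 == lid) = true then (lid, v) else p) = E := by
  induction E with
  | nil => rfl
  | cons p E ihE =>
    simp only [List.map_cons]
    rw [if_neg (by simpa using hE p (List.mem_cons_self ..)),
        ihE (fun q hq => hE q (List.mem_cons_of_mem _ hq))]

lemma keys_fillB (mp : Int) (d : PySem.Dict String (List (String × String)))
    (row : String × String × String) : (fillB mp d row).keys = d.keys := by
  obtain ⟨i, lid, u⟩ := row
  cases hg : d.get? lid with
  | none => simp only [fillB, hg]
  | some b =>
    have hc : d.contains lid = true := by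
      rw [PySem.Dict.contains_eq_isSome_get?, hg]; rfl
    simp only [fillB, hg]
    split
    · exact PySem.Dict.keys_insert_of_contains d _ hc
    · rfl

-- B's fill step on key lid already present in d commutes with appending pairs whose keys differ from lid
lemma fillB_mk_append (mp : Int) (d : PySem.Dict String (List (String × String)))
    (E : List (String × List (String × String))) (img lid url : String)
    (hc : d.contains lid = true) (hE : ∀ p ∈ E, p.1 ≠ lid) :
    fillB mp (PySem.Dict.mk (d.items ++ E)) (img, lid, url)
      = PySem.Dict.mk ((fillB mp d (img, lid, url)).items ++ E) := by
  obtain ⟨b, hb⟩ : ∃ b, d.get? lid = some b := by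
    rw [PySem.Dict.contains_eq_isSome_get?] at hc
    exact Option.isSome_iff_exists.mp hc
  have h1 : (PySem.Dict.mk d.items).get? lid = some b := hb
  have hget : (PySem.Dict.mk (d.items ++ E)).get? lid = some b := by
    rw [get?_mk_append, h1]; rfl
  have hc2 : (PySem.Dict.mk (d.items ++ E)).contains lid = true := by
    rw [PySem.Dict.contains_eq_isSome_get?, hget]; rfl
  have hc' : d.contains lid = true := hc
  simp only [fillB, hb, hget]
  by_cases hlen : ((b.length : Nat) : Int) < mp
  · rw [if_pos hlen, if_pos hlen]
    apply PySem.Dict.ext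
    rw [PySem.Dict.items_insert_of_contains _ _ hc2,
        PySem.Dict.items_insert_of_contains _ _ hc']
    show List.map _ (d.items ++ E) = _
    rw [List.map_append, map_keep lid _ E hE]
  · rw [if_neg hlen, if_neg hlen]

-- B's fill step at a fresh key lid, whose empty bucket sits right after d's items
lemma fillB_mk_append_fresh (mp : Int) (d : PySem.Dict String (List (String × String)))
    (E' : List (String × List (String × String))) (img lid url : String)
    (hn : d.get? lid = none) (hE : ∀ p ∈ E', p.1 ≠ lid) :
    fillB mp (PySem.Dict.mk (d.items ++ (lid, []) :: E')) (img, lid, url)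
      = PySem.Dict.mk ((fillB mp (d.insert lid []) (img, lid, url)).items ++ E') := by
  have hc : d.contains lid = false := (PySem.Dict.get?_eq_none_iff_contains d lid).mp hn
  have hdi : ∀ p ∈ d.items, p.1 ≠ lid := by
    intro p hp heq
    have hfind : List.find? (fun p => p.1 == lid) d.items = none := by
      cases hf : List.find? (fun p => p.1 == lid) d.items with
      | none => rfl
      | some q => simp [PySem.Dict.get?, hf] at hn
    have := List.find?_eq_none.mp hfind p hp
    simp [heq] at this
  have h1 : (PySem.Dict.mk d.items).get? lid = none := hn
  have hget : (PySem.Dict.mk (d.items ++ (lid, []) :: E')).get? lid = some [] := by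
    rw [get?_mk_append, h1]
    simp [PySem.Dict.get?]
  have hget2 : (d.insert lid []).get? lid = some ([] : List (String × String)) :=
    PySem.Dict.get?_insert_self d lid []
  have hc2 : (PySem.Dict.mk (d.items ++ (lid, []) :: E')).contains lid = true := by
    rw [PySem.Dict.contains_eq_isSome_get?, hget]; rfl
  simp only [fillB, hget, hget2, List.length_nil]
  by_cases hlen : (((0:Nat) : Nat) : Int) < mp
  · rw [if_pos hlen, if_pos hlen, PySem.Dict.insert_insert_self]
    apply PySem.Dict.ext
    rw [PySem.Dict.items_insert_of_contains _ _ hc2,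
        PySem.Dict.items_insert_of_not_contains _ _ hc]
    show List.map _ (d.items ++ (lid, []) :: E') = _
    rw [List.map_append, List.map_cons, map_keep lid _ E' hE,
        map_keep lid _ d.items hdi]
    simp
  · rw [if_neg hlen, if_neg hlen]
    apply PySem.Dict.ext
    rw [PySem.Dict.items_insert_of_not_contains _ _ hc]
    simp

-- A's step at a key already present is exactly B's fill step
lemma selA_mem (mc mp : Int) (d : PySem.Dict String (List (String × String)))
    (img lid url : String) (hc : d.contains lid = true) :
    selA mc mp d (img, lid, url) = fillB mp d (img, lid, url) := by
  obtain ⟨b, hb⟩ : ∃ b, d.get? lid = some b := by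
    rw [PySem.Dict.contains_eq_isSome_get?] at hc
    exact Option.isSome_iff_exists.mp hc
  have hgd : d.getD lid [] = b := by rw [PySem.Dict.getD_eq_get?_getD, hb]; rfl
  simp only [selA, fillB, hb, hc]
  simp [hgd]

-- A's step at a fresh key below the class cap is B's fill step after inserting the empty bucket
lemma selA_fresh (mc mp : Int) (d : PySem.Dict String (List (String × String)))
    (img lid url : String) (hc : d.contains lid = false) (hsz : ¬ mc ≤ (d.size : Int)) :
    selA mc mp d (img, lid, url) = fillB mp (d.insert lid []) (img, lid, url) := by
  have hgd : (d.insert lid ([] : List (String × String))).getD lid [] = [] :=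
    PySem.Dict.getD_insert_self d lid [] []
  simp only [selA, fillB, hc, hsz, PySem.Dict.get?_insert_self]
  simp [hgd]

-- main invariant: A's loop from state d equals B's fill pass started from d extended with the still-to-be-admitted keys (empty buckets)
lemma mainL (mc mp : Int) (rows : List (String × String × String)) :
    ∀ d : PySem.Dict String (List (String × String)), d.keys.Nodup →
    rows.foldl (selA mc mp) d
      = rows.foldl (fillB mp)
          (PySem.Dict.mk (d.items ++ (newKeys mc rows d.keys).map (fun c => (c, [])))) := by
  induction rows with
  | nil =>
    intro d _
    simp only [List.foldl_nil, newKeys, List.map_nil, List.append_nil]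
  | cons r rest ih =>
    intro d hnd
    obtain ⟨img, lid, url⟩ := r
    simp only [List.foldl_cons]
    by_cases hc : d.contains lid = true
    · -- the row's class is already in the dict
      have hkl : d.keys.contains lid = true := by rw [keys_contains_eq]; exact hc
      have hklm : lid ∈ d.keys := List.contains_iff_mem.mp hkl
      rw [newKeys_cons_mem mc img lid url rest d.keys hkl]
      have hE : ∀ p ∈ (newKeys mc rest d.keys).map
          (fun c => (c, ([] : List (String × String)))), p.1 ≠ lid := by
        intro p hp
        obtain ⟨c, hcmem, rfl⟩ := List.mem_map.mp hp
        intro h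
        exact newKeys_not_mem mc rest d.keys lid hklm (h ▸ hcmem)
      rw [fillB_mk_append mp d _ img lid url hc hE,
          selA_mem mc mp d img lid url hc]
      have hkeys : (fillB mp d (img, lid, url)).keys = d.keys := keys_fillB mp d _
      rw [ih (fillB mp d (img, lid, url)) (hkeys ▸ hnd), hkeys]
    · have hcf : d.contains lid = false := by simpa using hc
      have hn : d.get? lid = none := (PySem.Dict.get?_eq_none_iff_contains d lid).mpr hcf
      have hklm : lid ∉ d.keys := by
        rw [PySem.Dict.contains_eq_decide_mem_keys] at hcf
        simpa using hcf
      by_cases hsz : mc ≤ (d.size : Int)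
      · -- class cap reached: the row is skipped and no key is ever admitted again
        have hszk : mc ≤ ((d.keys.length : Nat) : Int) := by
          simpa [PySem.Dict.keys, PySem.Dict.size] using hsz
        have h1 : selA mc mp d (img, lid, url) = d := by
          simp only [selA]; rw [if_pos ⟨hcf, hsz⟩]
        have h2 : newKeys mc ((img, lid, url) :: rest) d.keys = [] := by
          simp only [newKeys]; rw [if_pos hszk]
        have h4 : fillB mp d (img, lid, url) = d := by simp only [fillB, hn]
        rw [h1, h2]
        simp only [List.map_nil, List.append_nil]
        have hmk : PySem.Dict.mk d.items = d := rfl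
        rw [hmk, h4, ih d hnd, newKeys_break mc rest d.keys hszk]
        simp only [List.map_nil, List.append_nil]
      · -- fresh class below the cap: admitted
        have hszk : ¬ mc ≤ ((d.keys.length : Nat) : Int) := by
          simpa [PySem.Dict.keys, PySem.Dict.size] using hsz
        have hklf : d.keys.contains lid = false := by rw [keys_contains_eq]; exact hcf
        have h2 : newKeys mc ((img, lid, url) :: rest) d.keys
            = lid :: newKeys mc rest (d.keys ++ [lid]) := by
          simp only [newKeys]
          rw [if_neg hszk, if_neg (by rw [hklf]; exact Bool.false_ne_true)]
        rw [h2]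
        simp only [List.map_cons]
        have hE : ∀ p ∈ (newKeys mc rest (d.keys ++ [lid])).map
            (fun c => (c, ([] : List (String × String)))), p.1 ≠ lid := by
          intro p hp
          obtain ⟨c, hcmem, rfl⟩ := List.mem_map.mp hp
          intro h
          exact newKeys_not_mem mc rest (d.keys ++ [lid]) lid (by simp) (h ▸ hcmem)
        rw [fillB_mk_append_fresh mp d _ img lid url hn hE,
            selA_fresh mc mp d img lid url hcf hsz]
        have hk1 : (fillB mp (d.insert lid []) (img, lid, url)).keys = d.keys ++ [lid] := by
          rw [keys_fillB]
          exact PySem.Dict.keys_insert_of_not_contains d _ hcf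
        have hnd1 : (fillB mp (d.insert lid ([] : List (String × String))) (img, lid, url)).keys.Nodup := by
          rw [hk1]
          simp [List.nodup_append, hnd]
          exact fun a ha heq => hklm (heq ▸ ha)
        rw [ih _ hnd1, hk1]

-- ===== VERDICT (by name: the statement is the Claim_ definition above) =====
theorem select_small_spec : Claim_equal_select_small := by
  intro rows mc mp _
  unfold Spec_select_small select_small select_small_alt
  rw [mainL mc mp rows PySem.Dict.empty (by simp [PySem.Dict.keys, PySem.Dict.empty])]
  rw [allowedB_eq mc rows [], List.nil_append]
  have hinit : List.foldl (fun d c => d.insert c ([] : List (String × String)))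
      PySem.Dict.empty (newKeys mc rows [])
      = PySem.Dict.mk ((newKeys mc rows []).map (fun c => (c, []))) := by
    apply PySem.Dict.ext
    have h := PySem.Dict.items_foldl_insert_fresh (newKeys mc rows []) (fun c : String => c)
        (fun _ => ([] : List (String × String))) PySem.Dict.empty
        (fun a _ => rfl) (by simpa using newKeys_nodup mc rows [])
    simpa using h
  rw [hinit]
  rfl
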